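-- pv_equiv track=rewrite | github.com/CanCOGeN-V/nf-ncov-voc | bin/gvf2tsv.py | match_gvfs_to_who_variant
-- ===== SOURCE A (Python) =====
-- def match_gvfs_to_who_variant(pango_lineage_list, gvf_files_list):
--     matched_files = []
--     if len(pango_lineage_list) > 1:
--         for lineage in pango_lineage_list:
--             if "*" in lineage:
--                 lineage = lineage.replace("*", "")
--             matched_files.extend([i for i in gvf_files_list if
--                                   i.startswith(lineage)])
--             matched_files = sorted(set(matched_files))
--     else:
--         for lineage in pango_lineage_list:
--             matched_files.extend([i for i in gvf_files_list if
--                                   i.startswith(lineage)])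
--     return matched_files
-- ===== SOURCE B (Python) =====
-- def match_gvfs_to_who_variant(pango_lineage_list, gvf_files_list):
--     if len(pango_lineage_list) > 1:
--         prefixes = [l.replace("*", "") for l in pango_lineage_list]
--         return sorted({f for f in gvf_files_list
--                        if any(f.startswith(p) for p in prefixes)})
--     return [f for f in gvf_files_list
--             if any(f.startswith(l) for l in pango_lineage_list)]
-- ===== Notes on version B (the rewrite author's own statement) =====
-- stated objective: faster
-- what changed: B makes a single pass over the files testing each against the cleaned prefixes at once and sorts/dedups the matches once at the end, instead of A's per-lineage passes each followed by a full sorted(set(...)) re-sort of the growing accumulator.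
import Mathlib
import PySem

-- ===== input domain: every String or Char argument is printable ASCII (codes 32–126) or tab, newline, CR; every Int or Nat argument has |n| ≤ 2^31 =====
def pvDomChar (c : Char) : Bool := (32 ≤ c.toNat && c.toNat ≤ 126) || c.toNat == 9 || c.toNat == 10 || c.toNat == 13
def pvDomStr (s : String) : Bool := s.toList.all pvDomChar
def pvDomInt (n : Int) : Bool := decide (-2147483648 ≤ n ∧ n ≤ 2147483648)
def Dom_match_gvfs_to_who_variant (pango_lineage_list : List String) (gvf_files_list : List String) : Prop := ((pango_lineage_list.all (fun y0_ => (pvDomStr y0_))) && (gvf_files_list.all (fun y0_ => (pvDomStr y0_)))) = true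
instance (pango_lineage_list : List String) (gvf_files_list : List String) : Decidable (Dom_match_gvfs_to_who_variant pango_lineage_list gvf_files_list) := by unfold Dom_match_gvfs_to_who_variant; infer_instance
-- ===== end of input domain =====

-- B replaces A's per-lineage passes (each followed by a full sorted(set(...)) re-sort of the
-- accumulator) with a single pass over the files against the cleaned prefixes and one final
-- sort/dedup; objective: simpler.

-- ===== PORT A =====
def match_gvfs_to_who_variant (pango_lineage_list : List String) (gvf_files_list : List String) : List String :=
  if pango_lineage_list.length > 1 then
    pango_lineage_list.foldl (fun matched lineage =>
      let lineage := if PySem.Str.isIn "*" lineage then PySem.Str.replace lineage "*" "" else lineage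
      let matched := matched ++ gvf_files_list.filter (fun i => PySem.Str.startswith i lineage)
      PySem.List.sorted (PySem.Set.ofList matched) (fun x => x) false) []
  else
    pango_lineage_list.foldl (fun matched lineage =>
      matched ++ gvf_files_list.filter (fun i => PySem.Str.startswith i lineage)) []

-- ===== PORT B =====
def match_gvfs_to_who_variant_alt (pango_lineage_list : List String) (gvf_files_list : List String) : List String :=
  if pango_lineage_list.length > 1 then
    let prefixes := pango_lineage_list.map (fun l => PySem.Str.replace l "*" "")
    PySem.List.sorted
      (PySem.Set.ofList (gvf_files_list.filter
        (fun f => prefixes.any (fun p => PySem.Str.startswith f p))))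
      (fun x => x) false
  else
    gvf_files_list.filter (fun f => pango_lineage_list.any (fun l => PySem.Str.startswith f l))

-- ===== PRECONDITION & SPEC =====
def Spec_match_gvfs_to_who_variant (pango_lineage_list : List String) (gvf_files_list : List String) (out : List String) : Prop := out = match_gvfs_to_who_variant_alt pango_lineage_list gvf_files_list
instance (pango_lineage_list : List String) (gvf_files_list : List String) (out : List String) : Decidable (Spec_match_gvfs_to_who_variant pango_lineage_list gvf_files_list out) := by unfold Spec_match_gvfs_to_who_variant; infer_instance

-- ===== CLAIM (what is proved, stated in full; the proofs are below) =====
def Claim_equal_match_gvfs_to_who_variant : Prop := ∀ (pango_lineage_list : List String) (gvf_files_list : List String), Dom_match_gvfs_to_who_variant pango_lineage_list gvf_files_list → Spec_match_gvfs_to_who_variant pango_lineage_list gvf_files_list (match_gvfs_to_who_variant pango_lineage_list gvf_files_list)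

-- ===== LEMMAS AND PROOFS =====

-- str.replace is the identity when the pattern does not occur (char-list level)
lemma replace_go_no_occ (old new : List Char) (l : List Char) :
    ∀ (fuel : Nat) (acc : List Char), l.length ≤ fuel → ¬ old <:+: l →
      PySem.Chars.replace.go old new fuel l acc = acc.reverse ++ l := by
  induction l with
  | nil =>
      intro fuel acc _ _
      cases fuel <;> simp [PySem.Chars.replace.go]
  | cons c t ih =>
      intro fuel acc hf h
      cases fuel with
      | zero => simp at hf
      | succ f =>
          have hp : old.isPrefixOf (c :: t) = false := by
            by_contra hcon
            have hb : old.isPrefixOf (c :: t) = true := by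
              cases hx : old.isPrefixOf (c :: t) with
              | true => rfl
              | false => exact absurd hx hcon
            exact h (List.isPrefixOf_iff_prefix.mp hb).isInfix
          have ht : ¬ old <:+: t := fun hx => h (hx.trans (List.suffix_cons c t).isInfix)
          rw [PySem.Chars.replace.go, hp]
          simp only [Bool.false_eq_true, if_false]
          rw [ih f (c :: acc) (by simpa using Nat.le_of_succ_le_succ hf) ht]
          simp

lemma toList_replace_noop (s : String) (h : PySem.Str.isIn "*" s = false) :
    (PySem.Str.replace s "*" "").toList = s.toList := by
  have hni : ¬ (("*" : String).toList <:+: s.toList) :=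
    (PySem.Chars.isIn_eq_false_iff _ _).mp (by simpa using h)
  rw [PySem.Str.toList_replace, PySem.Chars.replace]
  rw [if_neg (by decide)]
  rw [replace_go_no_occ _ _ _ _ _ (le_refl _) hni]
  simp

-- A's conditional '*'-stripping tests the same prefix as B's unconditional replace
lemma clean_pred (l f : String) :
    PySem.Str.startswith f (if PySem.Str.isIn "*" l then PySem.Str.replace l "*" "" else l)
      = PySem.Str.startswith f (PySem.Str.replace l "*" "") := by
  by_cases h : PySem.Str.isIn "*" l
  · rw [if_pos h]
  · rw [if_neg (by simpa using h)]
    simp only [PySem.Str.startswith_eq]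
    rw [toList_replace_noop l (by simpa using h)]

-- sorting the dedup of equal-membership lists gives the same list
lemma sorted_ofList_eq_of_mem_iff (X Y : List String)
    (h : ∀ a, a ∈ X ↔ a ∈ Y) :
    PySem.List.sorted (PySem.Set.ofList X) (fun x => x) false
      = PySem.List.sorted (PySem.Set.ofList Y) (fun x => x) false := by
  apply PySem.List.sorted_eq_sorted_of_perm _ _ _ (fun a b hab => hab)
  rw [List.perm_ext_iff_of_nodup (PySem.Set.nodup_ofList X) (PySem.Set.nodup_ofList Y)]
  intro a
  simp [PySem.Set.mem_ofList, h a]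

-- re-sorting an accumulated sorted set is the same as deduplicating at the end
lemma sorted_absorb (X Y : List String) :
    PySem.List.sorted (PySem.Set.ofList
        (PySem.List.sorted (PySem.Set.ofList X) (fun x => x) false ++ Y)) (fun x => x) false
      = PySem.List.sorted (PySem.Set.ofList (X ++ Y)) (fun x => x) false := by
  apply sorted_ofList_eq_of_mem_iff
  intro a
  simp [PySem.List.mem_sorted, PySem.Set.mem_ofList]

-- invariant of A's multi-lineage loop
lemma loop_invariant (gl : List String) (ps : List String) :
    ∀ (X : List String),
      ps.foldl (fun matched p =>
          PySem.List.sorted (PySem.Set.ofList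
            (matched ++ gl.filter (fun i => PySem.Str.startswith i p))) (fun x => x) false)
        (PySem.List.sorted (PySem.Set.ofList X) (fun x => x) false)
      = PySem.List.sorted (PySem.Set.ofList
          (X ++ ps.flatMap (fun p => gl.filter (fun i => PySem.Str.startswith i p))))
          (fun x => x) false := by
  induction ps with
  | nil => intro X; simp
  | cons p ps ih =>
      intro X
      simp only [List.foldl_cons, List.flatMap_cons]
      rw [sorted_absorb, ih (X ++ gl.filter (fun i => PySem.Str.startswith i p)),
        List.append_assoc]

-- ===== VERDICT (by name: the statement is the Claim_ definition above) =====
theorem match_gvfs_to_who_variant_spec : Claim_equal_match_gvfs_to_who_variant := by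
  intro pl gl _
  show match_gvfs_to_who_variant pl gl = match_gvfs_to_who_variant_alt pl gl
  unfold match_gvfs_to_who_variant match_gvfs_to_who_variant_alt
  by_cases hlen : pl.length > 1
  · simp only [if_pos hlen]
    have hstep : ∀ (m : List String) (l : String),
        (fun (matched : List String) (lineage : String) =>
          let lineage := if PySem.Str.isIn "*" lineage then PySem.Str.replace lineage "*" "" else lineage
          let matched := matched ++ gl.filter (fun i => PySem.Str.startswith i lineage)
          PySem.List.sorted (PySem.Set.ofList matched) (fun x => x) false) m l
        = PySem.List.sorted (PySem.Set.ofList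
            (m ++ gl.filter (fun i => PySem.Str.startswith i (PySem.Str.replace l "*" "")))) (fun x => x) false := by
      intro m l
      show PySem.List.sorted (PySem.Set.ofList
          (m ++ gl.filter (fun i => PySem.Str.startswith i
            (if PySem.Str.isIn "*" l then PySem.Str.replace l "*" "" else l)))) (fun x => x) false = _
      congr 2
      exact congrArg (fun X => m ++ X) (List.filter_congr (fun f _ => clean_pred l f))
    rw [List.foldl_ext
      (fun matched lineage =>
        let lineage := if PySem.Str.isIn "*" lineage then PySem.Str.replace lineage "*" "" else lineage
        let matched := matched ++ gl.filter (fun i => PySem.Str.startswith i lineage)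
        PySem.List.sorted (PySem.Set.ofList matched) (fun x => x) false)
      (fun m p => PySem.List.sorted (PySem.Set.ofList
          (m ++ gl.filter (fun i => PySem.Str.startswith i (PySem.Str.replace p "*" "")))) (fun x => x) false)
      [] (fun m l _ => hstep m l)]
    rw [← List.foldl_map (f := fun l => PySem.Str.replace l "*" "")
      (g := fun (m : List String) (p : String) =>
        PySem.List.sorted (PySem.Set.ofList
          (m ++ gl.filter (fun i => PySem.Str.startswith i p))) (fun x => x) false)
      (l := pl) (init := ([] : List String))]
    rw [show ([] : List String)
        = PySem.List.sorted (PySem.Set.ofList ([] : List String)) (fun x => x) false from rfl]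
    rw [loop_invariant gl (pl.map (fun l => PySem.Str.replace l "*" "")) []]
    simp only [List.nil_append]
    apply sorted_ofList_eq_of_mem_iff
    intro a
    simp only [List.mem_flatMap, List.mem_filter, List.mem_map, List.any_eq_true]
    constructor
    · rintro ⟨p, hp, ha, hs⟩; exact ⟨ha, p, hp, hs⟩
    · rintro ⟨ha, p, hp, hs⟩; exact ⟨p, hp, ha, hs⟩
  · simp only [if_neg hlen]
    cases pl with
    | nil => simp
    | cons l t =>
        cases t with
        | nil =>
            simp only [List.foldl_cons, List.foldl_nil, List.nil_append, List.any_cons,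
              List.any_nil, Bool.or_false]
        | cons b t2 =>
            exfalso
            simp only [List.length_cons, gt_iff_lt, not_lt] at hlen
            omega
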